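-- pv_equiv track=rewrite | github.com/DenisFeoktistov/parser_hk | Processing/preprocess/process_to_uniform/prices_and_deliveries/remove_extra_info.py | remove_extra_info
-- ===== SOURCE A (Python) =====
-- import copy
--
-- REQUIRED_KEYS = ["skuId", "spuId", "propertyDesc", "stripped_name", "zh_price", "delivery_info"]
--
-- def remove_extra_info(skus):
--     new_skus = copy.deepcopy(skus)
--
--     for sku in new_skus:
--         keys_to_delete = list()
--
--         for key in sku:
--             if key not in REQUIRED_KEYS:
--                 keys_to_delete.append(key)
--
--         for key in keys_to_delete:
--             del sku[key]
--
--     return new_skus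
-- ===== SOURCE B (Python) =====
-- REQUIRED_KEYS = ["skuId", "spuId", "propertyDesc", "stripped_name", "zh_price", "delivery_info"]
--
-- _REQUIRED_SET = frozenset(REQUIRED_KEYS)
--
-- def remove_extra_info(skus):
--     # select-then-copy: build each result dict fresh keeping only required keys
--     return [{k: v for k, v in sku.items() if k in _REQUIRED_SET} for sku in skus]
-- ===== Notes on version B (the rewrite author's own statement) =====
-- stated objective: simpler
-- what changed: Replaces deepcopy-whole-sku then collect-keys-to-delete then delete-pass with a single select-then-copy comprehension that builds each result dict fresh from the kept keys (set membership), preserving insertion order; equivalence is about the return value (B shares value objects with the input instead of deep-copying).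
import Mathlib
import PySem

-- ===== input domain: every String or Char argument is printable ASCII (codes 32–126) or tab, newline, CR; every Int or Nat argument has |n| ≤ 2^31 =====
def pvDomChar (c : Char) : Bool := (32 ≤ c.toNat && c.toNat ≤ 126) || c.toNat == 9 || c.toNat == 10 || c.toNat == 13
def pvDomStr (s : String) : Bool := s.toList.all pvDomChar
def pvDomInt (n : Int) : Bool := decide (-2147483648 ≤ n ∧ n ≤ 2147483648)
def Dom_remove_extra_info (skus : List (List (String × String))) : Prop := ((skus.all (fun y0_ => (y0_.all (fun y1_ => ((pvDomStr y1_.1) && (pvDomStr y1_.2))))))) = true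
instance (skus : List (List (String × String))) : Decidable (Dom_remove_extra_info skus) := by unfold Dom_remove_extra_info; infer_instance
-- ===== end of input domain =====

-- B builds each result dict fresh keeping only required keys (select-then-copy) instead of
-- deep-copying every sku and running a collect-then-delete pass; equivalence is about the
-- RETURN value (B shares value objects with the input where A deep-copies them).

-- ===== PORT A =====
def REQUIRED_KEYS : List String :=
  ["skuId", "spuId", "propertyDesc", "stripped_name", "zh_price", "delivery_info"]

-- copy.deepcopy on pure string data is the identity; 'for key in sku' iterates keys in
-- insertion order; 'del sku[key]' removes that key's entry (exact for dict-shaped inputs).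
def remove_extra_info (skus : List (List (String × String))) : List (List (String × String)) :=
  skus.map (fun sku =>
    let keys_to_delete :=
      sku.foldl (fun acc kv => if kv.1 ∈ REQUIRED_KEYS then acc else acc ++ [kv.1]) []
    keys_to_delete.foldl (fun s key => s.filter (fun kv => kv.1 != key)) sku)

-- ===== PORT B =====
def REQUIRED_SET : PySem.Set String := PySem.Set.ofList REQUIRED_KEYS

def remove_extra_info_alt (skus : List (List (String × String))) : List (List (String × String)) :=
  skus.map (fun sku => sku.filter (fun kv => PySem.Set.contains REQUIRED_SET kv.1))

-- ===== PRECONDITION & SPEC =====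
def Spec_remove_extra_info (skus : List (List (String × String))) (out : List (List (String × String))) : Prop := out = remove_extra_info_alt skus
instance (skus : List (List (String × String))) (out : List (List (String × String))) : Decidable (Spec_remove_extra_info skus out) := by unfold Spec_remove_extra_info; infer_instance

-- ===== CLAIM (what is proved, stated in full; the proofs are below) =====
def Claim_equal_remove_extra_info : Prop := ∀ (skus : List (List (String × String))), Dom_remove_extra_info skus → Spec_remove_extra_info skus (remove_extra_info skus)

-- ===== LEMMAS AND PROOFS =====

-- deleting a list of keys one by one is one filter against that list
theorem foldl_del_eq_filter (ks : List String) (sku : List (String × String)) :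
    ks.foldl (fun s key => s.filter (fun kv => kv.1 != key)) sku
      = sku.filter (fun kv => !ks.contains kv.1) := by
  induction ks generalizing sku with
  | nil => simp
  | cons k ks ih =>
    simp only [List.foldl_cons, ih, List.filter_filter]
    apply List.filter_congr
    intro kv _
    by_cases he : kv.1 = k <;> by_cases hm : kv.1 ∈ ks <;>
      simp [he, hm, List.contains_eq_mem, bne]

-- keys_to_delete collects exactly the keys of sku that are not required
theorem keys_to_delete_eq (sku : List (String × String)) :
    sku.foldl (fun acc kv => if kv.1 ∈ REQUIRED_KEYS then acc else acc ++ [kv.1]) []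
      = ((sku.filter (fun kv => decide (kv.1 ∉ REQUIRED_KEYS))).map Prod.fst) := by
  induction sku using List.reverseRecOn with
  | nil => simp
  | append_singleton xs x ih =>
    simp only [List.foldl_append, List.foldl_cons, List.foldl_nil, ih, List.filter_append,
      List.map_append]
    by_cases h : x.1 ∈ REQUIRED_KEYS <;> simp [h]

theorem per_sku (sku : List (String × String)) :
    (let keys_to_delete :=
        sku.foldl (fun acc kv => if kv.1 ∈ REQUIRED_KEYS then acc else acc ++ [kv.1]) []
     keys_to_delete.foldl (fun s key => s.filter (fun kv => kv.1 != key)) sku)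
      = sku.filter (fun kv => PySem.Set.contains REQUIRED_SET kv.1) := by
  simp only [keys_to_delete_eq, foldl_del_eq_filter]
  apply List.filter_congr
  intro kv hkv
  have hset : PySem.Set.contains REQUIRED_SET kv.1 = decide (kv.1 ∈ REQUIRED_KEYS) := by
    by_cases h : kv.1 ∈ REQUIRED_KEYS
    · have hm : kv.1 ∈ REQUIRED_SET := by simpa [REQUIRED_SET, PySem.Set.mem_ofList] using h
      simp only [h, decide_true]
      exact (PySem.Set.contains_iff REQUIRED_SET kv.1).2 hm
    · simp only [h, decide_false]
      by_contra hc
      have hc' : PySem.Set.contains REQUIRED_SET kv.1 = true := by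
        revert hc; cases PySem.Set.contains REQUIRED_SET kv.1 <;> simp
      exact h (by simpa [REQUIRED_SET, PySem.Set.mem_ofList] using
        (PySem.Set.contains_iff REQUIRED_SET kv.1).1 hc')
  rw [hset]
  have hktd : (((sku.filter (fun kv => decide (kv.1 ∉ REQUIRED_KEYS))).map Prod.fst).contains kv.1)
      = decide (kv.1 ∉ REQUIRED_KEYS) := by
    by_cases h : kv.1 ∈ REQUIRED_KEYS
    · simp only [List.contains_eq_mem, List.mem_map, List.mem_filter, decide_eq_true_eq, h,
        not_true, decide_false, decide_eq_false_iff_not]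
      rintro ⟨a, ⟨_, ha⟩, heq⟩
      exact ha (heq ▸ h)
    · simp only [h, not_false_iff, decide_true, List.contains_eq_mem, decide_eq_true_eq]
      exact List.mem_map.2 ⟨kv, List.mem_filter.2 ⟨hkv, by simpa using h⟩, rfl⟩
  rw [hktd]
  by_cases h : kv.1 ∈ REQUIRED_KEYS <;> simp [h]

-- ===== VERDICT (by name: the statement is the Claim_ definition above) =====
theorem remove_extra_info_spec : Claim_equal_remove_extra_info := by
  intro skus _
  unfold Spec_remove_extra_info remove_extra_info remove_extra_info_alt
  exact List.map_congr_left (fun sku _ => per_sku sku)
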